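-- pv_equiv track=rewrite | github.com/Diem2511/api-factory-automation | app/services/dashboard_service.py | _categorize_endpoints
-- ===== SOURCE A (Python) =====
-- from typing import Dict, List, Any
--
-- def _categorize_endpoints(endpoints: List[Dict]) -> Dict[str, List]:
--     """Categoriza endpoints por tipo"""
--     categories = {
--         "users": [],
--         "products": [],
--         "data": [],
--         "system": [],
--         "other": []
--     }
--
--     for endpoint in endpoints:
--         url = endpoint.get("url", "").lower()
--
--         if any(word in url for word in ['user', 'customer', 'member']):
--             categories["users"].append(endpoint)
--         elif any(word in url for word in ['product', 'item', 'inventory']):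
--             categories["products"].append(endpoint)
--         elif any(word in url for word in ['data', 'analytics', 'metrics']):
--             categories["data"].append(endpoint)
--         elif any(word in url for word in ['health', 'status', 'system']):
--             categories["system"].append(endpoint)
--         else:
--             categories["other"].append(endpoint)
--
--     return categories
-- ===== SOURCE B (Python) =====
-- from typing import Dict, List, Any
--
-- _RULES = [
--     ("users", ['user', 'customer', 'member']),
--     ("products", ['product', 'item', 'inventory']),
--     ("data", ['data', 'analytics', 'metrics']),
--     ("system", ['health', 'status', 'system']),
-- ]
--
-- def _classify(endpoint):
--     url = endpoint.get("url", "").lower()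
--     return next((name for name, kws in _RULES if any(k in url for k in kws)), "other")
--
-- def _categorize_endpoints(endpoints: List[Dict]) -> Dict[str, List]:
--     """Categoriza endpoints por tipo (una pasada de filtrado por categoria)"""
--     return {name: [e for e in endpoints if _classify(e) == name]
--             for name in ("users", "products", "data", "system", "other")}
-- ===== Notes on version B (the rewrite author's own statement) =====
-- stated objective: simpler
-- what changed: A builds the dict by a single pass appending each endpoint into a mutable accumulator via an if/elif chain; B has no accumulator at all: a pure classify helper plus a dict comprehension that builds each category's list by an independent filter pass over the endpoints.
import Mathlib
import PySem

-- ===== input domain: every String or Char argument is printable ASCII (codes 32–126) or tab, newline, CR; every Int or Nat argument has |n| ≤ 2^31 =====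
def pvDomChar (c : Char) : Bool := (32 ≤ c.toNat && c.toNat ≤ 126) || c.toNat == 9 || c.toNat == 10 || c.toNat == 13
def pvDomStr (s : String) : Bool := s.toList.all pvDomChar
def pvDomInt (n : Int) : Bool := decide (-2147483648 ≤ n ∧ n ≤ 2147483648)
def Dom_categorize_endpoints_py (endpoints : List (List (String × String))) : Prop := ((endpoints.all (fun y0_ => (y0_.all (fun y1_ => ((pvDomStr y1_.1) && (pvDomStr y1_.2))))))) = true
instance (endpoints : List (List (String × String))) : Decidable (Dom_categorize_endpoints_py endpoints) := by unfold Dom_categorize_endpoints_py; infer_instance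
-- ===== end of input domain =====

-- B drops A's single-pass mutable-dict accumulator: a pure classify helper + one independent filter pass per category; objective: simpler.

-- ===== PORT A =====
-- A's single pass: an if/elif chain appends each endpoint into the mutable categories dict.
def categorize_endpoints_py (endpoints : List (List (String × String))) : List (String × List (List (String × String))) :=
  let categories : PySem.Dict String (List (List (String × String))) :=
    ⟨[("users", []), ("products", []), ("data", []), ("system", []), ("other", [])]⟩
  (endpoints.foldl (fun cats endpoint =>
    let url := PySem.Str.lower (PySem.Dict.getD ⟨endpoint⟩ "url" "")
    if ["user", "customer", "member"].any (fun word => PySem.Str.isIn word url) then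
      cats.modify "users" [] (fun l => l ++ [endpoint])
    else if ["product", "item", "inventory"].any (fun word => PySem.Str.isIn word url) then
      cats.modify "products" [] (fun l => l ++ [endpoint])
    else if ["data", "analytics", "metrics"].any (fun word => PySem.Str.isIn word url) then
      cats.modify "data" [] (fun l => l ++ [endpoint])
    else if ["health", "status", "system"].any (fun word => PySem.Str.isIn word url) then
      cats.modify "system" [] (fun l => l ++ [endpoint])
    else
      cats.modify "other" [] (fun l => l ++ [endpoint])) categories).items

-- ===== PORT B =====
-- ordered rules table (category name, keywords); 'other' is the default when no rule matches
def pvRules : List (String × List String) :=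
  [("users", ["user", "customer", "member"]),
   ("products", ["product", "item", "inventory"]),
   ("data", ["data", "analytics", "metrics"]),
   ("system", ["health", "status", "system"])]

-- _classify: the category name of one endpoint (first matching rule, else "other")
def pvClassify (endpoint : List (String × String)) : String :=
  let url := PySem.Str.lower (PySem.Dict.getD ⟨endpoint⟩ "url" "")
  ((pvRules.find? (fun r => r.2.any (fun k => PySem.Str.isIn k url))).map Prod.fst).getD "other"

-- dict comprehension: for each name, an independent filter pass over endpoints
def categorize_endpoints_py_alt (endpoints : List (List (String × String))) : List (String × List (List (String × String))) :=
  ["users", "products", "data", "system", "other"].map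
    (fun name => (name, endpoints.filter (fun e => pvClassify e == name)))

-- ===== PRECONDITION & SPEC =====
def Spec_categorize_endpoints_py (endpoints : List (List (String × String))) (out : List (String × List (List (String × String)))) : Prop := out = categorize_endpoints_py_alt endpoints
instance (endpoints : List (List (String × String))) (out : List (String × List (List (String × String)))) : Decidable (Spec_categorize_endpoints_py endpoints out) := by unfold Spec_categorize_endpoints_py; infer_instance

-- ===== CLAIM (what is proved, stated in full; the proofs are below) =====
def Claim_equal_categorize_endpoints_py : Prop := ∀ (endpoints : List (List (String × String))), Dom_categorize_endpoints_py endpoints → Spec_categorize_endpoints_py endpoints (categorize_endpoints_py endpoints)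

-- ===== LEMMAS AND PROOFS =====
-- A's chain step is a modify at the classify key.
theorem pv_stepA_eq (cats : PySem.Dict String (List (List (String × String))))
    (endpoint : List (String × String)) :
    (let url := PySem.Str.lower (PySem.Dict.getD ⟨endpoint⟩ "url" "")
     if ["user", "customer", "member"].any (fun word => PySem.Str.isIn word url) then
       cats.modify "users" [] (fun l => l ++ [endpoint])
     else if ["product", "item", "inventory"].any (fun word => PySem.Str.isIn word url) then
       cats.modify "products" [] (fun l => l ++ [endpoint])
     else if ["data", "analytics", "metrics"].any (fun word => PySem.Str.isIn word url) then
       cats.modify "data" [] (fun l => l ++ [endpoint])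
     else if ["health", "status", "system"].any (fun word => PySem.Str.isIn word url) then
       cats.modify "system" [] (fun l => l ++ [endpoint])
     else
       cats.modify "other" [] (fun l => l ++ [endpoint])) =
    cats.modify (pvClassify endpoint) [] (fun l => l ++ [endpoint]) := by
  show (let url := PySem.Str.lower (PySem.Dict.getD ⟨endpoint⟩ "url" ""); _) = _
  simp only [pvClassify, pvRules, List.find?]
  cases hc1 : List.any ["user", "customer", "member"]
      (fun word => PySem.Str.isIn word (PySem.Str.lower (PySem.Dict.getD ⟨endpoint⟩ "url" ""))) <;>
  cases hc2 : List.any ["product", "item", "inventory"]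
      (fun word => PySem.Str.isIn word (PySem.Str.lower (PySem.Dict.getD ⟨endpoint⟩ "url" ""))) <;>
  cases hc3 : List.any ["data", "analytics", "metrics"]
      (fun word => PySem.Str.isIn word (PySem.Str.lower (PySem.Dict.getD ⟨endpoint⟩ "url" ""))) <;>
  cases hc4 : List.any ["health", "status", "system"]
      (fun word => PySem.Str.isIn word (PySem.Str.lower (PySem.Dict.getD ⟨endpoint⟩ "url" ""))) <;>
  simp

-- classify lands on one of the five keys
theorem pv_classify_mem (e : List (String × String)) :
    pvClassify e = "users" ∨ pvClassify e = "products" ∨ pvClassify e = "data" ∨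
    pvClassify e = "system" ∨ pvClassify e = "other" := by
  simp only [pvClassify, pvRules, List.find?]
  cases List.any ["user", "customer", "member"]
      (fun word => PySem.Str.isIn word (PySem.Str.lower (PySem.Dict.getD ⟨e⟩ "url" ""))) <;>
  cases List.any ["product", "item", "inventory"]
      (fun word => PySem.Str.isIn word (PySem.Str.lower (PySem.Dict.getD ⟨e⟩ "url" ""))) <;>
  cases List.any ["data", "analytics", "metrics"]
      (fun word => PySem.Str.isIn word (PySem.Str.lower (PySem.Dict.getD ⟨e⟩ "url" ""))) <;>
  cases List.any ["health", "status", "system"]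
      (fun word => PySem.Str.isIn word (PySem.Str.lower (PySem.Dict.getD ⟨e⟩ "url" ""))) <;>
  simp

-- invariant: folding modify-at-classify over l extends each of the five slots by l's matching endpoints
theorem pv_fold_inv (l : List (List (String × String)))
    (v1 v2 v3 v4 v5 : List (List (String × String))) :
    (l.foldl (fun cats e => PySem.Dict.modify cats (pvClassify e) [] (fun acc => acc ++ [e]))
      ⟨[("users", v1), ("products", v2), ("data", v3), ("system", v4), ("other", v5)]⟩).items =
    [("users", v1 ++ l.filter (fun e => pvClassify e == "users")),
     ("products", v2 ++ l.filter (fun e => pvClassify e == "products")),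
     ("data", v3 ++ l.filter (fun e => pvClassify e == "data")),
     ("system", v4 ++ l.filter (fun e => pvClassify e == "system")),
     ("other", v5 ++ l.filter (fun e => pvClassify e == "other"))] := by
  induction l generalizing v1 v2 v3 v4 v5 with
  | nil => simp
  | cons e l ih =>
    rcases pv_classify_mem e with h | h | h | h | h
    · simp only [List.foldl_cons, h]
      rw [show (PySem.Dict.modify ⟨[("users", v1), ("products", v2), ("data", v3), ("system", v4), ("other", v5)]⟩ "users" [] (fun acc => acc ++ [e])) = (⟨[("users", v1 ++ [e]), ("products", v2), ("data", v3), ("system", v4), ("other", v5)]⟩ : PySem.Dict String (List (List (String × String)))) from rfl]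
      rw [ih]
      simp [h]
    · simp only [List.foldl_cons, h]
      rw [show (PySem.Dict.modify ⟨[("users", v1), ("products", v2), ("data", v3), ("system", v4), ("other", v5)]⟩ "products" [] (fun acc => acc ++ [e])) = (⟨[("users", v1), ("products", v2 ++ [e]), ("data", v3), ("system", v4), ("other", v5)]⟩ : PySem.Dict String (List (List (String × String)))) from rfl]
      rw [ih]
      simp [h]
    · simp only [List.foldl_cons, h]
      rw [show (PySem.Dict.modify ⟨[("users", v1), ("products", v2), ("data", v3), ("system", v4), ("other", v5)]⟩ "data" [] (fun acc => acc ++ [e])) = (⟨[("users", v1), ("products", v2), ("data", v3 ++ [e]), ("system", v4), ("other", v5)]⟩ : PySem.Dict String (List (List (String × String)))) from rfl]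
      rw [ih]
      simp [h]
    · simp only [List.foldl_cons, h]
      rw [show (PySem.Dict.modify ⟨[("users", v1), ("products", v2), ("data", v3), ("system", v4), ("other", v5)]⟩ "system" [] (fun acc => acc ++ [e])) = (⟨[("users", v1), ("products", v2), ("data", v3), ("system", v4 ++ [e]), ("other", v5)]⟩ : PySem.Dict String (List (List (String × String)))) from rfl]
      rw [ih]
      simp [h]
    · simp only [List.foldl_cons, h]
      rw [show (PySem.Dict.modify ⟨[("users", v1), ("products", v2), ("data", v3), ("system", v4), ("other", v5)]⟩ "other" [] (fun acc => acc ++ [e])) = (⟨[("users", v1), ("products", v2), ("data", v3), ("system", v4), ("other", v5 ++ [e])]⟩ : PySem.Dict String (List (List (String × String)))) from rfl]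
      rw [ih]
      simp [h]

-- ===== VERDICT (by name: the statement is the Claim_ definition above) =====
theorem categorize_endpoints_py_spec : Claim_equal_categorize_endpoints_py := by
  intro endpoints _
  unfold Spec_categorize_endpoints_py categorize_endpoints_py categorize_endpoints_py_alt
  simp only [pv_stepA_eq]
  simpa using pv_fold_inv endpoints [] [] [] [] []
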